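-- pv_equiv track=rewrite | github.com/itinawi/6.853-Final-Project | game_theory_strategies.py | determine_gradual_play_from_hist
-- ===== SOURCE A (Python) =====
-- def determine_gradual_play_from_hist(hist):
--     current_sequence = 0
--     total_defects = 0
--     for play in hist:
--         if play[0]==1:
--             total_defects += 1
--             current_sequence = 0
--         elif play[1]==0:
--             current_sequence += 1
--     if current_sequence<total_defects:
--         return 1
--     elif hist[-1][1]==1 or (len(hist)>1 and hist[-2][1]==1):
--         return 0
--     elif hist[-1][0]==1 and hist[-1][1]==0:
--         return 1
--     else:
--         return 0
-- ===== SOURCE B (Python) =====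
-- def determine_gradual_play_from_hist(hist):
--     total_defects = sum(1 for p in hist if p[0] == 1)
--     current_sequence = 0
--     for p in reversed(hist):
--         if p[0] == 1:
--             break
--         if p[1] == 0:
--             current_sequence += 1
--     if current_sequence < total_defects:
--         return 1
--     prev_coop = len(hist) > 1 and hist[-2][1] == 1
--     return 1 if tuple(hist[-1]) == (1, 0) and not prev_coop else 0
-- ===== Notes on version B (the rewrite author's own statement) =====
-- stated objective: alternative
-- what changed: A's single forward loop carrying two interacting counters and a three-branch return chain is replaced by a whole-history defect count, a backward tail scan with early break counting trailing second-component-0 plays since the last defect, and a single boolean formula (last play equals (1,0) and the previous play did not cooperate) for the final decision.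
import Mathlib
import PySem

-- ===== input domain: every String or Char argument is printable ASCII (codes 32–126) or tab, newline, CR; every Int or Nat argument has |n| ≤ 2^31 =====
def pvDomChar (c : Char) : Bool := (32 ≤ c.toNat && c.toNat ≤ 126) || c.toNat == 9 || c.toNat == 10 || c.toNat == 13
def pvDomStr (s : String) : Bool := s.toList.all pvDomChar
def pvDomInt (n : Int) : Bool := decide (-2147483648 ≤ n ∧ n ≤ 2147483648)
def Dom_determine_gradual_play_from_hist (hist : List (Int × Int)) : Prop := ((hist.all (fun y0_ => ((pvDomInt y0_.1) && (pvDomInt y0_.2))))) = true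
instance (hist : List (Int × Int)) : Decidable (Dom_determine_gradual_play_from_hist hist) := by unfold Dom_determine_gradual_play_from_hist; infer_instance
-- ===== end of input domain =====

-- ===== PORT A =====
-- A: one forward pass over (current_sequence, total_defects) plus a three-branch decision chain.
-- B instead counts defects globally, scans the tail backwards with an early break, and decides with one boolean formula.
def determine_gradual_play_from_hist (hist : List (Int × Int)) : Int :=
  let st := hist.foldl (fun (s : Int × Int) play =>
    if play.1 == 1 then (0, s.2 + 1)
    else if play.2 == 0 then (s.1 + 1, s.2)
    else s) ((0 : Int), (0 : Int))
  if st.1 < st.2 then 1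
  else
    match PySem.List.pyGet? hist (-1) with
    | none => 0  -- hist[-1] raises IndexError in Python: excluded by Pre_
    | some last =>
      if last.2 == 1 || (decide (hist.length > 1) &&
          (match PySem.List.pyGet? hist (-2) with | none => false | some p => p.2 == 1)) then 0
      else if last.1 == 1 && last.2 == 0 then 1
      else 0

-- ===== PORT B =====
-- 'for p in reversed(hist): if p[0]==1: break; if p[1]==0: current_sequence += 1'
def pvTailSeq : List (Int × Int) → Int
  | [] => 0
  | p :: rest => if p.1 == 1 then 0 else if p.2 == 0 then pvTailSeq rest + 1 else pvTailSeq rest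

def determine_gradual_play_from_hist_alt (hist : List (Int × Int)) : Int :=
  let total_defects : Int := hist.countP (fun p => p.1 == 1)   -- sum(1 for p in hist if p[0] == 1)
  let current_sequence := pvTailSeq hist.reverse
  if current_sequence < total_defects then 1
  else
    let prev_coop := decide (hist.length > 1) &&
      (match PySem.List.pyGet? hist (-2) with | none => false | some p => p.2 == 1)
    match PySem.List.pyGet? hist (-1) with
    | none => 0  -- hist[-1] raises IndexError in Python: excluded by Pre_
    | some last => if last == ((1 : Int), (0 : Int)) && !prev_coop then 1 else 0

-- ===== PRECONDITION & SPEC =====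
-- Both Pythons raise IndexError (hist[-1]) on the empty history; Pre_ excludes exactly that input.
def Pre_determine_gradual_play_from_hist (hist : List (Int × Int)) : Prop := hist ≠ []
instance (hist : List (Int × Int)) : Decidable (Pre_determine_gradual_play_from_hist hist) := by
  unfold Pre_determine_gradual_play_from_hist; infer_instance
def pvWitness_determine_gradual_play_from_hist : (List (Int × Int)) := [(0, 0)]
def Spec_determine_gradual_play_from_hist (hist : List (Int × Int)) (out : Int) : Prop := out = determine_gradual_play_from_hist_alt hist
instance (hist : List (Int × Int)) (out : Int) : Decidable (Spec_determine_gradual_play_from_hist hist out) := by unfold Spec_determine_gradual_play_from_hist; infer_instance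

-- ===== CLAIM (what is proved, stated in full; the proofs are below) =====
def Claim_equal_determine_gradual_play_from_hist : Prop := ∀ (hist : List (Int × Int)), Dom_determine_gradual_play_from_hist hist → Pre_determine_gradual_play_from_hist hist → Spec_determine_gradual_play_from_hist hist (determine_gradual_play_from_hist hist)

-- ===== LEMMAS AND PROOFS =====

-- A's loop state equals (B's backward tail count, B's defect count).
theorem pvState_eq (hist : List (Int × Int)) :
    hist.foldl (fun (s : Int × Int) play =>
      if play.1 == 1 then (0, s.2 + 1)
      else if play.2 == 0 then (s.1 + 1, s.2)
      else s) ((0 : Int), (0 : Int))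
    = (pvTailSeq hist.reverse, (hist.countP (fun p => p.1 == 1) : Int)) := by
  induction hist using List.reverseRecOn with
  | nil => simp [pvTailSeq]
  | append_singleton xs p ih =>
    simp only [List.foldl_append, List.foldl_cons, List.foldl_nil, ih,
      List.reverse_append, List.reverse_cons, List.reverse_nil, List.nil_append,
      List.cons_append, pvTailSeq, List.countP_append, List.countP_cons, List.countP_nil]
    by_cases h1 : p.1 == 1 <;> by_cases h2 : p.2 == 0 <;>
      simp [h1, h2]

-- The two decision blocks agree for any last element and prev_coop flag.
theorem pvDecide_eq (last : Int × Int) (pc : Bool) :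
    (if last.2 == 1 || pc then (0 : Int)
     else if last.1 == 1 && last.2 == 0 then 1 else 0)
    = (if last == ((1 : Int), (0 : Int)) && !pc then 1 else 0) := by
  obtain ⟨a, b⟩ := last
  by_cases hb1 : b = 1 <;> by_cases hb0 : b = 0 <;> by_cases ha : a = 1 <;>
    cases pc <;> simp_all

-- ===== VERDICT (by name: the statement is the Claim_ definition above) =====
theorem determine_gradual_play_from_hist_spec : Claim_equal_determine_gradual_play_from_hist := by
  intro hist _ _
  unfold Spec_determine_gradual_play_from_hist determine_gradual_play_from_hist
    determine_gradual_play_from_hist_alt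
  rw [pvState_eq]
  simp only
  split
  · rfl
  · cases PySem.List.pyGet? hist (-1) with
    | none => rfl
    | some last => exact pvDecide_eq last _
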